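/- GENERATED by mk_final_copies.py from the proof of the farm's unit `inverse_mdct.7b` (farm:inverse_mdct.7b.1: Proof.lean) as the
   re-elaboration sweep compiled it — do not edit. -/
import Asan.CheckWalk
import Vorbis.Spec.MdctUse
import Vorbis.Spec.Units.inverse_mdct_7b

open X86 X86.User Asan Vorbis Vorbis.Spec

set_option maxRecDepth 4000
set_option maxHeartbeats 4000000

namespace Vorbis.Spec.inverse_mdct_7b

/-- 0x109963 `movsxd rax, DWORD PTR [rbp−7CH]` … 0x10997f `mov r14, [r14 + rbx*8 + 8]` with `rbx = rax + 0xB6`: for a block type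
`b < 2` the address of the load is `f + 1464 + 8·b`, the element `b` of `f->bit_reverse`. -/
theorem addr_load {b : Nat} (h : b < 2) (x : Word) :
    x + (Word.ofBV (BitVec.signExtend 64 (BitVec.ofNat 32 b)) + 182) * 8 + 8 = x + UInt64.ofNat (1464 + 8 * b) := by
  have hb : b = 0 ∨ b = 1 := by omega
  rw [UInt64.add_assoc]
  rcases hb with rfl | rfl
  · have e : (Word.ofBV (BitVec.signExtend 64 (BitVec.ofNat 32 0)) + 182) * 8 + 8 = UInt64.ofNat (1464 + 8 * 0) := by
      decide
    rw [e]
  · have e : (Word.ofBV (BitVec.signExtend 64 (BitVec.ofNat 32 1)) + 182) * 8 + 8 = UInt64.ofNat (1464 + 8 * 1) := by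
      decide
    rw [e]

/-- 0x109972 `lea rdi, [r14 + rax*8 + 0x5B8]`: the same address, as the check site sees it. -/
theorem addr_check {b : Nat} (h : b < 2) (x : Word) :
    x + Word.ofBV (BitVec.signExtend 64 (BitVec.ofNat 32 b)) * 8 + 1464 = x + UInt64.ofNat (1464 + 8 * b) := by
  have hb : b = 0 ∨ b = 1 := by omega
  rw [UInt64.add_assoc]
  rcases hb with rfl | rfl
  · have e : Word.ofBV (BitVec.signExtend 64 (BitVec.ofNat 32 0)) * 8 + 1464 = UInt64.ofNat (1464 + 8 * 0) := by
      decide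
    rw [e]
  · have e : Word.ofBV (BitVec.signExtend 64 (BitVec.ofNat 32 1)) * 8 + 1464 = UInt64.ofNat (1464 + 8 * 1) := by
      decide
    rw [e]

/-- **Where the temp block is**, as arithmetic for `u_omega`: above the image's text, inside the data space, off the stack
region, 8-aligned. -/
theorem tmp_where7b {others : List Obj} {frames : List (Nat × FrameLayout)} {len : Nat} {A : Arena} {stored room : Int}
    {ysz : Nat → Nat} {k c : Nat} {ue : State}
    (hpre : inverse_mdct.Pre others frames len A stored room ysz k c ue) :
    1154368 ≤ inverse_mdct.tmp A ue ∧ inverse_mdct.tmp A ue + 2 * inverse_mdct.n ue ≤ 12582912 ∧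
    (inverse_mdct.tmp A ue + 2 * inverse_mdct.n ue ≤ 7340032 ∨ 8388608 ≤ inverse_mdct.tmp A ue) := by
  have hr := hpre.tmp_range
  have hAT : 1154368 ≤ A.B := hpre.arenaText
  have h1 := hpre.ado.ok.AR1
  have h1x := hpre.ado.ok.AR1x
  have h2 := hpre.ado.ok.AR2
  omega

/-- **The pointer loaded at 0x10997f is `R = f->bit_reverse[bt]` of the entry**: the read goes through the return address the
check call pushed at `[rsp − 8]` (off `*f`: `offStack`), and `*f` reads as at the entry (`Body.tabR_eq`). -/
theorem loaded_tabR {u₀ : State} {others : List Obj} {frames : List (Nat × FrameLayout)} {len : Nat} {A : Arena}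
    {stored room : Int} {ysz : Nat → Nat} {k c : Nat} {ue : State} {ret : Word} {v : State}
    (hb : inverse_mdct.Body u₀ others frames len A stored room ysz k c ue ret v) (x : Nat) :
    (v.mem.writeLE (ue.reg .rsp - 192) 8 x).readLE
      (ue.reg .rdx + (Word.ofBV (BitVec.signExtend 64 (BitVec.ofNat 32 (inverse_mdct.bt ue))) + 182) * 8 + 8) 8 =
      inverse_mdct.tabR ue := by
  have hp := hb.pre
  have hbt := hp.btLt
  have hroom := hb.entry.room
  have htop := hb.entry.top
  simp only [vspec, conv_stackLo, conv_stackHi] at hroom htop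
  have hfin := hp.ok.inside _ hp.ob1
  have hoS := hp.offStack _ hp.ob1
  simp only [vblock, voff] at hfin hoS
  have hrdx : ue.reg .rdx = addr (inverse_mdct.f ue) := eq_addr _ _ (inverse_mdct.f_def ue).symm
  have hsp : (ue.reg .rsp - 192).toNat = (ue.reg .rsp).toNat - 192 := by u_omega
  have hlt : inverse_mdct.f ue + (1464 + 8 * inverse_mdct.bt ue) < 2 ^ 64 := by omega
  rw [addr_load hbt, hrdx, addr_add]
  rw [Mem.readLE_writeLE_disjoint_noWrap _ _ _ _ _ _ ?_ ?_ ?_]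
  · rw [← hb.tabR_eq]
    simp only [vacc, voff]
    rw [Nat.add_assoc]
    rfl
  · unfold Mem.NoWrap
    omega
  · unfold Mem.NoWrap
    rw [toNat_addr _ hlt]
    omega
  · rw [toNat_addr _ hlt, hsp]
    omega

/-- **The frame rule of segment 7b**: the block stores the return address of the check call at `[rsp − 8]` and three qwords into
the own frame (`q[rbp−50H]`, `q[rbp−58H]`, `q[rbp−40H]`); every other slot the exit assertion speaks of is kept, `Body` is carried by
`Body.carry`, and the three new slots read what was stored. -/
theorem tail_carry {u₀ : State} {others : List Obj} {frames : List (Nat × FrameLayout)} {len : Nat} {A : Arena}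
    {stored room : Int} {ysz : Nat → Nat} {k c : Nat} {ue : State} {ret : Word} {v s : State} {x d1 off r : Nat}
    (hf : inverse_mdct.Frame7 u₀ others frames len A stored room ysz k c ue ret v)
    (w_mem : s.mem =
      (((v.mem.writeLE (ue.reg .rsp - 192) 8 x).writeLE (ue.reg .rsp - 88) 8 d1).writeLE (ue.reg .rsp - 96) 8 off).writeLE
        (ue.reg .rsp - 72) 8 r)
    (hd1 : d1 < 2 ^ 64) (hoff : off < 2 ^ 64) (hr : r < 2 ^ 64)
    (hcode : CodeOK u₀ s.mem) (habi : abiInv s)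
    (hrbp : s.reg .rbp = ue.reg .rsp - 8) (hrsp : s.reg .rsp = ue.reg .rsp - 184) :
    inverse_mdct.Body u₀ others frames len A stored room ysz k c ue ret s ∧ inverse_mdct.SlotsBuf ue s ∧
    inverse_mdct.SlotsS2 ue s ∧ s.mem.readLE (ue.reg .rsp - 72) 8 = r ∧ s.mem.readLE (ue.reg .rsp - 88) 8 = d1 ∧
    s.mem.readLE (ue.reg .rsp - 96) 8 = off := by
  have hb := hf.body
  have hroom := hb.entry.room
  have htop := hb.entry.top
  simp only [vspec, conv_stackLo, conv_stackHi] at hroom htop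
  obtain ⟨ht1, ht2, ht3⟩ := tmp_where7b hb.pre
  have q0 : UInt64.ofNat (s.mem.readLE (ue.reg .rsp) 8) = ret := by u_frame hb.retSlot
  have q1 : UInt64.ofNat (s.mem.readLE (ue.reg .rsp - 8) 8) = ue.reg .rbp := by u_frame hb.rbpSlot
  have q2 : UInt64.ofNat (s.mem.readLE (ue.reg .rsp - 16) 8) = ue.reg .r15 := by u_frame hb.r15Slot
  have q3 : UInt64.ofNat (s.mem.readLE (ue.reg .rsp - 24) 8) = ue.reg .r14 := by u_frame hb.r14Slot
  have q4 : UInt64.ofNat (s.mem.readLE (ue.reg .rsp - 32) 8) = ue.reg .r13 := by u_frame hb.r13Slot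
  have q5 : UInt64.ofNat (s.mem.readLE (ue.reg .rsp - 40) 8) = ue.reg .r12 := by u_frame hb.r12Slot
  have q6 : UInt64.ofNat (s.mem.readLE (ue.reg .rsp - 48) 8) = ue.reg .rbx := by u_frame hb.rbxSlot
  have q7 : UInt64.ofNat (s.mem.readLE (ue.reg .rsp - 128) 8) = ue.reg .rdx := by u_frame hb.fSlot
  have q8 : s.mem.readLE (ue.reg .rsp - 132) 4 = inverse_mdct.bt ue := by u_frame hb.btSlot
  have q9 : s.mem.readLE (ue.reg .rsp - 152) 4 = A.T := by u_frame hb.saveSlot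
  have q10 : s.mem.readLE (ue.reg .rsp - 112) 8 = inverse_mdct.tmp A ue := by u_frame hb.vSlot
  have p1 : UInt64.ofNat (s.mem.readLE (ue.reg .rsp - 64) 8) = ue.reg .rdi := by u_frame hf.sBuf.uSlot
  have p2 : s.mem.readLE (ue.reg .rsp - 76) 4 = inverse_mdct.n ue := by u_frame hf.sBuf.nSlot
  have p3 : s.mem.readLE (ue.reg .rsp - 176) 8 = inverse_mdct.buf ue + 4 * (inverse_mdct.n ue / 2) := by
    u_frame hf.sBuf.uMidSlot
  have p4 : s.mem.readLE (ue.reg .rsp - 160) 8 = 4 * (inverse_mdct.n ue / 2) - 32 := by u_frame hf.sS2.n2x4m32Slot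
  have p5 : s.mem.readLE (ue.reg .rsp - 168) 8 = 4 * (inverse_mdct.n ue / 4) := by u_frame hf.sS2.n4x4Slot
  have r1 : s.mem.readLE (ue.reg .rsp - 72) 8 = r := by u_read
  have r2 : s.mem.readLE (ue.reg .rsp - 88) 8 = d1 := by u_read
  have r3 : s.mem.readLE (ue.reg .rsp - 96) 8 = off := by u_read
  have hs : Mem.SameExcept
      [⟨(ue.reg .rsp).toNat - 368, (ue.reg .rsp).toNat⟩,
       ⟨inverse_mdct.buf ue, inverse_mdct.buf ue + 4 * inverse_mdct.n ue⟩,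
       ⟨inverse_mdct.tmp A ue, inverse_mdct.tmp A ue + 2 * inverse_mdct.n ue⟩] v.mem s.mem := by
    u_same
  exact ⟨inverse_mdct.Body.carry hb hs hcode habi hrbp hrsp q0 q1 q2 q3 q4 q5 q6 q7 q8 q9 q10,
    ⟨p1, p2, p3⟩, ⟨p4, p5⟩, r1, r2, r3⟩

/-- **Segment 7b of `inverse_mdct`** (`cut19` 0x109963 … 0x1099b4 `jmp loop8`). -/
theorem seg7b {Lay : Layout} (hLay : Lay.hi = 0x1000000) {μ : Microarch} (hμ : UserX.MicroOK μ) {u₀ : State}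
    (hcode : HasCodeNat Lay u₀ Vorbis.L.inverse_mdct.entry Vorbis.Code.code_inverse_mdct.nat Vorbis.L.inverse_mdct.size)
    (hload8 : Asan.SmallCheck Lay μ Vorbis.WayInv (Vorbis.CodeOK u₀) [.rax, .rcx, .rdx] 8 Vorbis.L.__asan_load8_noabort.entry)
    {others : List Obj} {frames : List (Nat × FrameLayout)} {len : Nat} {A : Arena} {stored room : Int} {ysz : Nat → Nat}
    {k c : Nat} {ue : State} {ret : Word} {v : State}
    (hat : inverse_mdct.AtCut19 u₀ others frames len A stored room ysz k c ue ret v) :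
    ReachVia Lay μ WayInv v (fun w => inverse_mdct.At8 u₀ others frames len A stored room ysz k c ue ret w) := by
  have hb := hat.frame.body
  have hp := hb.pre
  have he := hb.entry
  v_entry he
  have w_rip := hat.rip
  have c_rsp := hb.rsp
  have c_rbp := hb.rbp
  have c_r15 := hat.r15
  have w_eq : Mem.EqOn Vorbis.L.textLo Vorbis.L.textHi u₀.mem v.mem := hb.code
  have hdf : v.flags .df = false := (show abiInv _ from hb.abi).1
  have hmx : v.mxcsr &&& 0x1F80 = 0x1F80 := (show abiInv _ from hb.abi).2
  have hsse := Vorbis.sseOK_of_abiInv hb.abi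
  have sl_bt := hb.btSlot
  have sl_f := hb.fSlot
  have sl_v := hb.vSlot
  have sl_n4 := hat.frame.sS2.n4x4Slot
  have sl_n2 := hat.frame.n2x4Slot
  have hbt := hp.btLt
  u_walk hcode [hμ.vendor] until [Vorbis.L.inverse_mdct.loop8] span [Vorbis.L.textLo, Vorbis.L.textHi] side (v_side)
  case check_10997a =>
    -- 0x10997a, line 2811: the 8 bytes of `f->bit_reverse[bt]` at `f + 1464 + 8·bt`, inside the live block `*f`
    have hun : ShadowUntouched v.mem s_10997a.mem := by v_untouched
    have hLf : LiveBytes (A.newTempObj (2 * inverse_mdct.n ue) :: others) frames (inverse_mdct.f ue) 1808 :=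
      LiveBytes.of_block (hp.blkLive _ _ hp.ob1) (Nat.le_refl _) (Nat.le_refl _)
    have hfin := hp.ok.inside _ hp.ob1
    simp only [vblock, voff] at hfin
    have hrdx : ue.reg .rdx = addr (inverse_mdct.f ue) := eq_addr _ _ (inverse_mdct.f_def ue).symm
    have hlt : inverse_mdct.f ue + (1464 + 8 * inverse_mdct.bt ue) < 2 ^ 64 := by omega
    have e := toNat_addr _ hlt
    rw [addr_check hbt, hrdx, addr_add]
    refine hLf.accSmall hb.shadow hun _ 8 (by decide) ?_ ?_
    · rw [e]
      omega
    · rw [e]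
      omega
  · -- 0x1099b4 `jmp loop8`: the assertion `At8`
    have hR := loaded_tabR hb 1087871
    rw [hR] at w_mem w_r14
    have hnf := hp.isBlocksize.facts
    obtain ⟨ht1, ht2, ht3⟩ := tmp_where7b hp
    have habi : abiInv s_1099b4 := by
      refine Vorbis.abiInv_of ?_ ?_
      · rw [w_flags]
        simp only [X86.User.df_setStatus]
        exact w_df_10997a
      · rw [w_mxcsr]
        exact hmx
    have hrbp' : s_1099b4.reg .rbp = ue.reg .rsp - 8 := by
      rw [w_kept .rbp rfl]
      exact c_rbp
    obtain ⟨hb', hsBuf', hsS2', r1, r2, r3⟩ :=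
      tail_carry hat.frame w_mem (UInt64.toNat_lt _) (UInt64.toNat_lt _) (UInt64.toNat_lt _) w_eq habi hrbp' w_rsp
    have hRlt : inverse_mdct.tabR ue < 2 ^ 64 := by
      rw [inverse_mdct.tabR_def]
      simp only [vacc]
      exact Mem.ptr_lt _ _
    refine ReachVia.done ⟨w_rip, hb', hsBuf', hsS2', ?_, ?_, ?_, ?_, ?_, ?_⟩
    · -- `q[rbp − 40H] = R`
      rw [r1, UInt64.toNat_ofNat']
      exact Nat.mod_eq_of_lt hRlt
    · -- `q[rbp − 50H] = &v[n2 − 4]`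
      rw [r2]
      u_omega
    · -- `q[rbp − 58H] = 4·n2 − 16`
      rw [r3]
      u_omega
    · -- `rbx = &v[n4 − 4]`
      rw [w_rbx]
      u_omega
    · -- `r12 = &v[n2 − 4]`
      rw [w_r12]
      u_omega
    · -- `r13 = u`
      rw [w_r13]
      exact (inverse_mdct.buf_def ue).symm

end Vorbis.Spec.inverse_mdct_7b

/-- Unit `inverse_mdct.7b`: segment 7b of `inverse_mdct` takes `AtCut19` to `At8`. -/
theorem Vorbis.Spec.Worked.inverse_mdct_7b_ok : Vorbis.Spec.inverse_mdct_7b.Statement := by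
  intro Lay hLay μ hμ u₀ hcode hload8 others frames len A stored room ysz k c ue ret v hat
  exact Vorbis.Spec.inverse_mdct_7b.seg7b hLay hμ hcode hload8 hat
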